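-- pv_equiv track=rewrite | github.com/sujaykodamala/LeetCodeSolutions | non-decreasing-array/non-decreasing-array.py | isArraySorted
-- ===== SOURCE A (Python) =====
-- def isArraySorted(array, index):
--     array.pop(index)
--     idx = 0
--     while idx < len(array)-1:
--         if array[idx] > array[idx+1]:
--             return False
--         idx += 1
--     return True
-- ===== SOURCE B (Python) =====
-- def isArraySorted(array, index):
--     array.pop(index)
--     return array == sorted(array)
-- ===== Notes on version B (the rewrite author's own statement) =====
-- stated objective: idiomatic
-- what changed: Replaces the index-walking while-loop adjacent comparison with a sort-and-compare (array == sorted(array)) after the same in-place pop.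
import Mathlib
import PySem

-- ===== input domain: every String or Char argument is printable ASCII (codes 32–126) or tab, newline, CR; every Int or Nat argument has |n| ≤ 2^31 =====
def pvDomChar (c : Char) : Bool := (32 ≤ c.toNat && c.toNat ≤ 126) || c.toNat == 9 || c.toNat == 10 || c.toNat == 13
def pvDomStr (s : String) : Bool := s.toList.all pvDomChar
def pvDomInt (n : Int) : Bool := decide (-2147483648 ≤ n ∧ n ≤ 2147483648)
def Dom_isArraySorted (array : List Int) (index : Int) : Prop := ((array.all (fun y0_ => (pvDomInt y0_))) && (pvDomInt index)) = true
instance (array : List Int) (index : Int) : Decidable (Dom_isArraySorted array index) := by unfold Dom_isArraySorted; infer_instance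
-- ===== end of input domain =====

-- ===== PORT A =====
-- B replaces A's while-loop adjacent scan with pop-then-sort-and-compare (same in-place pop side effect; equivalence is about the return value).
-- while idx < len(array)-1: if array[idx] > array[idx+1]: return False; idx += 1  — idx walks the list, so structural recursion on the remaining suffix
def isArraySortedLoop : List Int → Bool
  | x :: y :: rest => if x > y then false else isArraySortedLoop (y :: rest)
  | _ => true

def isArraySorted (array : List Int) (index : Int) : Bool :=
  match PySem.List.pop? array index with
  | none => false        -- unreachable under Pre_ (IndexError)
  | some (_, arr) => isArraySortedLoop arr

-- ===== PORT B =====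
def isArraySorted_alt (array : List Int) (index : Int) : Bool :=
  match PySem.List.pop? array index with
  | none => false        -- unreachable under Pre_ (IndexError)
  | some (_, arr) => decide (arr = PySem.List.sorted arr (fun x => x) false)

-- ===== PRECONDITION & SPEC =====
-- Pre_ excludes exactly the inputs on which array.pop(index) raises IndexError.
def Pre_isArraySorted (array : List Int) (index : Int) : Prop :=
  PySem.Raise.InRange array.length index
instance (array : List Int) (index : Int) : Decidable (Pre_isArraySorted array index) := by unfold Pre_isArraySorted; infer_instance

def pvWitness_isArraySorted : List Int × Int := ([3, 1, 2], 0)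

def Spec_isArraySorted (array : List Int) (index : Int) (out : Bool) : Prop := out = isArraySorted_alt array index
instance (array : List Int) (index : Int) (out : Bool) : Decidable (Spec_isArraySorted array index out) := by unfold Spec_isArraySorted; infer_instance

-- ===== CLAIM (what is proved, stated in full; the proofs are below) =====
def Claim_equal_isArraySorted : Prop := ∀ (array : List Int) (index : Int), Dom_isArraySorted array index → Pre_isArraySorted array index → Spec_isArraySorted array index (isArraySorted array index)

-- ===== LEMMAS AND PROOFS =====
theorem isArraySortedLoop_iff (l : List Int) :
    isArraySortedLoop l = true ↔ l.Pairwise (· ≤ ·) := by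
  rw [← List.isChain_iff_pairwise]
  induction l with
  | nil => simp [isArraySortedLoop]
  | cons x t ih =>
    cases t with
    | nil => simp [isArraySortedLoop]
    | cons y r =>
      rw [List.isChain_cons_cons, ← ih]
      by_cases h : x > y
      · simp [isArraySortedLoop, h]; try omega
      · simp [isArraySortedLoop, h]; intro _; omega

theorem loop_eq_sorted_cmp (l : List Int) :
    isArraySortedLoop l = decide (l = PySem.List.sorted l (fun x => x) false) := by
  by_cases h : l.Pairwise (· ≤ ·)
  · have h1 : isArraySortedLoop l = true := (isArraySortedLoop_iff l).mpr h
    have h2 := PySem.List.sorted_eq_self_of_pairwise (key := fun x : Int => x) (xs := l) h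
    simp [h1, h2]
  · have h1 : isArraySortedLoop l ≠ true := fun he => h ((isArraySortedLoop_iff l).mp he)
    have h2 : l ≠ PySem.List.sorted l (fun x => x) false := by
      intro he
      exact h (he ▸ PySem.List.sorted_pairwise l (fun x => x))
    simp [Bool.not_eq_true] at h1
    simp [h1, h2]

-- ===== VERDICT (by name: the statement is the Claim_ definition above) =====
theorem isArraySorted_spec : Claim_equal_isArraySorted := by
  intro array index _ _
  unfold Spec_isArraySorted isArraySorted isArraySorted_alt
  cases PySem.List.pop? array index with
  | none => rfl
  | some r => exact loop_eq_sorted_cmp r.2
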